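-- pv_equiv track=rewrite | github.com/jongwook98/algorithm_python | 4.브루트포스/수이어쓰기1.py | cal_num_size
-- ===== SOURCE A (Python) =====
-- def cal_num_size(num):
--     count = 1
--     sum_size = 0
--     while num:
--         if num >= (10**count) - (10**(count-1)):
--             sum_size += count * ((10**count) - (10**(count-1)))
--             num -= (10**count) - (10**(count-1))
--             count += 1
--         else:
--             sum_size += (num*count)
--             break
--
--     return sum_size
-- ===== SOURCE B (Python) =====
-- def cal_num_size(num):
--     if num < 1:
--         return num
--     d, p = 1, 10
--     while num >= p:
--         d += 1
--         p *= 10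
--     return (num + 1) * d - (p - 1) // 9
-- ===== Notes on version B (the rewrite author's own statement) =====
-- stated objective: simpler
-- what changed: Replaces A's group-by-group accumulation loop (which adds count*group_size per digit-length group) with a short digit-count loop followed by the single closed-form formula (num+1)*d - (10**d - 1)//9; num < 1 returns num as A does.
import Mathlib
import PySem

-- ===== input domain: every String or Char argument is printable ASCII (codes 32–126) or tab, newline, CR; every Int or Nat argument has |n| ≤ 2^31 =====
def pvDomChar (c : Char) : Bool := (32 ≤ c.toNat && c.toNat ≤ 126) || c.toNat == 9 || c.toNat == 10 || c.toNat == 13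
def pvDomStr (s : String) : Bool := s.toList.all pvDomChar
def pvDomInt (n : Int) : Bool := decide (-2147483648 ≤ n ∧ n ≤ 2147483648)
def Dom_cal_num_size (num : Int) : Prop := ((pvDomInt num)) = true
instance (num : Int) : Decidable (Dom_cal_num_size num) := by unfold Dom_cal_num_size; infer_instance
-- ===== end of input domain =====

-- B replaces A's group-by-group digit accumulation with a digit-count loop plus one closed-form
-- formula (objective: simpler / alternative).


-- ===== PORT A =====
-- A's while-loop; Python's `count` (which starts at 1) is carried as `c = count - 1 : Nat`
-- so the group size 10^(c+1) - 10^c is provably positive and the loop terminates;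
-- all intermediate values are identical to Python's.
def calLoop (num : Int) (c : Nat) (s : Int) : Int :=
  if num = 0 then s                                      -- `while num:` exits
  else if 10 ^ (c + 1) - 10 ^ c ≤ num then               -- num >= 10**count - 10**(count-1)
    calLoop (num - (10 ^ (c + 1) - 10 ^ c)) (c + 1) (s + (c + 1 : Nat) * (10 ^ (c + 1) - 10 ^ c))
  else s + num * (c + 1 : Nat)                           -- sum_size += num*count; break
termination_by num.toNat
decreasing_by
  have hp : (0:Int) < 10 ^ c := pow_pos (by norm_num) c
  have _hs : (10:Int) ^ (c + 1) = 10 ^ c * 10 := pow_succ 10 c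
  omega

def cal_num_size (num : Int) : Int := calLoop num 0 0

-- ===== PORT B =====
-- `d, p = 1, 10; while num >= p: d += 1; p *= 10` — returns the final (d, p).
-- The `p ≤ 0` guard is unreachable from B's call (p starts at 10); it only makes the
-- recursion total.
def dlp (num p : Int) (d : Nat) : Nat × Int :=
  if p ≤ 0 then (d, p)
  else if p ≤ num then dlp num (p * 10) (d + 1)
  else (d, p)
termination_by (num + 1 - p).toNat

def cal_num_size_alt (num : Int) : Int :=
  if num < 1 then num
  else
    let dp := dlp num 10 1
    (num + 1) * dp.1 - PySem.Int.floordiv (dp.2 - 1) 9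

-- ===== PRECONDITION & SPEC =====
def Spec_cal_num_size (num : Int) (out : Int) : Prop := out = cal_num_size_alt num
instance (num : Int) (out : Int) : Decidable (Spec_cal_num_size num out) := by unfold Spec_cal_num_size; infer_instance

-- ===== CLAIM (what is proved, stated in full; the proofs are below) =====
def Claim_equal_cal_num_size : Prop := ∀ (num : Int), Dom_cal_num_size num → Spec_cal_num_size num (cal_num_size num)

-- ===== LEMMAS AND PROOFS =====

-- rep c = (10^c - 1)/9, the repunit 11…1 with c ones, defined recursively.
def rep : Nat → Int
  | 0 => 0
  | c + 1 => 10 * rep c + 1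

theorem rep_mul (c : Nat) : (10:Int) ^ c - 1 = 9 * rep c := by
  induction c with
  | zero => simp [rep]
  | succ c ih => rw [pow_succ, rep]; linarith

theorem pow10_mono {a b : Nat} (h : a ≤ b) : (10:Int) ^ a ≤ 10 ^ b :=
  pow_le_pow_right₀ (by norm_num) h

-- dlp, started at p = 10^d, returns (D, 10^D) with 10^(D-1) ≤ num < 10^D.
theorem dlp_spec (k : Nat) : ∀ (d : Nat) (num : Int), 1 ≤ d → (10:Int) ^ (d - 1) ≤ num →
    num < 10 ^ (d + k) →
    ∃ D : Nat, dlp num (10 ^ d) d = (D, 10 ^ D) ∧ 1 ≤ D ∧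
      (10:Int) ^ (D - 1) ≤ num ∧ num < 10 ^ D := by
  induction k with
  | zero =>
    intro d num hd hlo hhi
    rw [dlp]
    have hp : ¬ (10:Int) ^ d ≤ 0 := by
      have := pow_pos (show (0:Int) < 10 by norm_num) d; omega
    have hn : ¬ (10:Int) ^ d ≤ num := by simpa using hhi
    rw [if_neg hp, if_neg hn]
    exact ⟨d, rfl, hd, hlo, by simpa using hhi⟩
  | succ k ih =>
    intro d num hd hlo hhi
    rw [dlp]
    have hp : ¬ (10:Int) ^ d ≤ 0 := by
      have := pow_pos (show (0:Int) < 10 by norm_num) d; omega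
    rw [if_neg hp]
    by_cases hn : (10:Int) ^ d ≤ num
    · have hstep : (10:Int) ^ d * 10 = 10 ^ (d + 1) := (pow_succ 10 d).symm
      rw [if_pos hn, hstep]
      exact ih (d + 1) num (by omega) (by simpa using hn)
        (by rw [show d + 1 + k = d + (k + 1) from by omega]; exact hhi)
    · rw [if_neg hn]
      exact ⟨d, rfl, hd, hlo, by simpa using not_le.mp hn⟩

-- If c < D and N < 10^(c+1) and 10^(D-1) ≤ N then D = c + 1.
theorem D_succ {c D : Nat} {N : Int} (hcD : c < D) (hN : N < 10 ^ (c + 1))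
    (hlo : (10:Int) ^ (D - 1) ≤ N) : D = c + 1 := by
  by_contra h
  have h2 : c + 1 ≤ D - 1 := by omega
  have := pow10_mono h2
  omega

-- Closed form of A's loop: entering stage c with num = N - (10^c - 1) and s,
-- where N has D digits and c < D, the loop returns the closed-form total.
theorem loop_closed (k : Nat) : ∀ (c : Nat) (N s : Int) (D : Nat),
    c < D → D ≤ c + k → (10:Int) ^ (D - 1) ≤ N → N < 10 ^ D →
    calLoop (N - (10 ^ c - 1)) c s
      = s + (N + 1) * D - rep D - ((10:Int) ^ c * c - rep c) := by
  induction k with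
  | zero => intro c N s D hcD hDk _ _; omega
  | succ k ih =>
    intro c N s D hcD hDk hlo hhi
    have hcD1 : c ≤ D - 1 := by omega
    have hNc : (10:Int) ^ c ≤ N := le_trans (pow10_mono hcD1) hlo
    have hpos : N - (10 ^ c - 1) ≠ 0 := by
      have := pow_pos (show (0:Int) < 10 by norm_num) c; omega
    have hsucc : (10:Int) ^ (c + 1) = 10 ^ c * 10 := pow_succ 10 c
    have h9 := rep_mul c
    have hr : rep (c + 1) = 10 * rep c + 1 := rfl
    rw [calLoop]
    rw [if_neg hpos]
    by_cases hbr : (10:Int) ^ (c + 1) - 10 ^ c ≤ N - (10 ^ c - 1)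
    · -- group branch: N ≥ 10^(c+1) - 1
      rw [if_pos hbr]
      have harg : N - (10 ^ c - 1) - (10 ^ (c + 1) - 10 ^ c) = N - (10 ^ (c + 1) - 1) := by ring
      rw [harg]
      by_cases hend : N = 10 ^ (c + 1) - 1
      · -- the subtraction empties num; the loop exits and D = c + 1
        have hD : D = c + 1 := D_succ hcD (by omega) hlo
        subst hD
        rw [hend]
        have h0 : (10:Int) ^ (c + 1) - 1 - (10 ^ (c + 1) - 1) = 0 := by ring
        rw [h0, calLoop, if_pos rfl, hr]
        push_cast
        linear_combination -h9
      · -- N ≥ 10^(c+1): recurse at stage c + 1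
        have hge : (10:Int) ^ (c + 1) ≤ N := by omega
        have hcD' : c + 1 < D := by
          by_contra h
          have hDe : D = c + 1 := by omega
          rw [hDe] at hhi
          omega
        rw [ih (c + 1) N (s + ((c : Nat) + 1 : Nat) * (10 ^ (c + 1) - 10 ^ c)) D hcD'
          (by omega) hlo hhi, hr]
        push_cast
        linear_combination -h9
    · -- final branch: num < group size, so D = c + 1 and the loop breaks
      rw [if_neg hbr]
      have hD : D = c + 1 := D_succ hcD (by omega) hlo
      subst hD
      rw [hr]
      push_cast
      linear_combination -h9

-- ===== VERDICT (by name: the statement is the Claim_ definition above) =====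
theorem cal_num_size_spec : Claim_equal_cal_num_size := by
  intro num hdom
  unfold Spec_cal_num_size cal_num_size cal_num_size_alt
  by_cases hneg : num < 1
  · -- num ≤ 0: A returns num (0 → 0, negative → num via the break branch)
    rw [calLoop]
    rw [if_pos hneg]
    by_cases h0 : num = 0
    · simp [h0]
    · have hlt : ¬ (10:Int) ^ (0 + 1) - 10 ^ 0 ≤ num := by norm_num; omega
      rw [if_neg h0, if_neg hlt]
      push_cast; ring
  · -- 1 ≤ num ≤ 2^31 < 10^10
    rw [if_neg hneg]
    have hdom' : -2147483648 ≤ num ∧ num ≤ 2147483648 := by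
      have h : pvDomInt num = true := hdom
      unfold pvDomInt at h
      exact of_decide_eq_true h
    have h1 : (1:Int) ≤ num := by omega
    have hub : num < 10 ^ (1 + 9) := by norm_num; omega
    obtain ⟨D, hEq, hD1, hlo, hhi⟩ := dlp_spec 9 1 num le_rfl (by simpa using h1) hub
    have h10 : ((10:Int) ^ 1) = 10 := by norm_num
    rw [h10] at hEq
    have hDle : D ≤ 10 := by
      by_contra h
      have h2 := pow10_mono (show 10 ≤ D - 1 by omega)
      have := le_trans h2 hlo
      norm_num at this; omega
    have hA : calLoop (num - (10 ^ 0 - 1)) 0 0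
        = 0 + (num + 1) * (D : Int) - rep D - ((10:Int) ^ 0 * (0 : Nat) - rep 0) :=
      loop_closed 10 0 num 0 D (by omega) (by omega) hlo hhi
    rw [show num - ((10:Int) ^ 0 - 1) = num from by norm_num] at hA
    rw [hA, hEq]
    simp [rep]
    rw [rep_mul D]
    exact (Int.mul_ediv_cancel_left _ (by norm_num)).symm
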